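-- pv_equiv track=rewrite | github.com/dongkyu92/TIL | Python/Algorithm/가장 긴 팰린드롬.py | solution
-- ===== SOURCE A (Python) =====
-- def solution(s):
--     answer = 0
--
--     for i in range(len(s) - 1):
--         temp_before = s[:i + 1]
--         temp_after = s[:i + 2]
--
--         m, l = 0, len(temp_before) - 1
--         if len(temp_before) % 2 != 0:
--             if len(temp_before) == 1:
--                 answer += 1
--             else:
--
--                 if temp_before[m] == temp_before[l]:
--                     answer += 1
--                 else:
--                     continue
--         else:
--             continue
--     return answer
-- ===== SOURCE B (Python) =====
-- def solution(s):
--     if not s: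
--         return 0
--     return s[0:len(s) - 1:2].count(s[0])
-- ===== Notes on version B (the rewrite author's own statement) =====
-- stated objective: faster
-- what changed: Replaces the per-prefix loop (slicing every prefix, parity/length branching, prefix end indexing) with one strided slice s[0:len(s)-1:2] of the even-indexed characters and a single count of s[0].
import Mathlib
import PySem

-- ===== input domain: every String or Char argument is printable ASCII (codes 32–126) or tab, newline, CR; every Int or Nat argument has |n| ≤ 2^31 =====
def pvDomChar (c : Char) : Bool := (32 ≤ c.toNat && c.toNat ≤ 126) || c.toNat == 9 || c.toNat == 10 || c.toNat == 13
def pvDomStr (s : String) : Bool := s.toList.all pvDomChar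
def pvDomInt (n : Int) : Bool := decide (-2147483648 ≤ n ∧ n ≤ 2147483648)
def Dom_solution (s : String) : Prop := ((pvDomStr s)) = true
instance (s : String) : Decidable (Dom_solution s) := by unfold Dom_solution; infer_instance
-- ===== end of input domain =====

-- ===== PORT A =====
-- A slices every prefix (quadratic); B reads the even-indexed characters once via the
-- strided slice s[0:len(s)-1:2] and counts s[0] in it — same return value, one linear pass.
def solution (s : String) : Int :=
  (PySem.List.pyRange 0 ((s.toList.length : Int) - 1) 1).foldl
    (fun answer i =>
      let temp_before := PySem.List.slice s.toList none (some (i + 1))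
      let _temp_after := PySem.List.slice s.toList none (some (i + 2))
      -- m, l = 0, len(temp_before) - 1
      if temp_before.length % 2 ≠ 0 then
        if temp_before.length = 1 then answer + 1
        else
          match PySem.List.pyGet? temp_before 0,
                PySem.List.pyGet? temp_before ((temp_before.length : Int) - 1) with
          | some cm, some cl => if cm == cl then answer + 1 else answer
          | _, _ => answer   -- unreachable: both indices are in range in this branch
      else answer) 0

-- ===== PORT B =====
def solution_alt (s : String) : Int :=
  if s.toList.isEmpty then 0
  else
    match PySem.List.pyGet? s.toList 0 with
    | none => 0   -- unreachable: s is nonempty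
    | some c =>
      match PySem.List.slice? s.toList (some 0) (some ((s.toList.length : Int) - 1)) 2 with
      | none => 0   -- unreachable: the step 2 is nonzero
      | some strided => (PySem.List.count strided c : Int)

-- ===== PRECONDITION & SPEC =====
def Spec_solution (s : String) (out : Int) : Prop := out = solution_alt s
instance (s : String) (out : Int) : Decidable (Spec_solution s out) := by unfold Spec_solution; infer_instance

-- ===== CLAIM (what is proved, stated in full; the proofs are below) =====
def Claim_equal_solution : Prop := ∀ (s : String), Dom_solution s → Spec_solution s (solution s)

-- ===== LEMMAS AND PROOFS =====

-- The common characterisation: both programs count the even positions k < len-1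
-- (equivalently the positions 2j with j < len/2) whose character equals the first one.

-- parity split of a count over `range`
theorem countP_even_range (p : Nat → Bool) (m : Nat) :
    (List.range m).countP (fun k => (k % 2 == 0) && p k)
      = (List.range ((m+1)/2)).countP (fun j => p (2*j)) := by
  induction m with
  | zero => simp
  | succ n ih =>
    rw [List.range_succ, List.countP_append, ih]
    by_cases h : n % 2 = 0
    · have h1 : (n+1+1)/2 = (n+1)/2 + 1 := by omega
      have h2 : 2 * ((n+1)/2) = n := by omega
      rw [h1, List.range_succ, List.countP_append]
      simp [h, h2]
    · have h1 : (n+1+1)/2 = (n+1)/2 := by omega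
      simp [h1, h]

-- A's loop counts the even k < len-1 with l[0] == l[k]
theorem solution_eq_countP (s : String) (h : 0 < s.toList.length) :
    solution s = ((List.range (s.toList.length - 1)).countP
      (fun k => (k % 2 == 0) && (s.toList[0]? == s.toList[k]?)) : Int) := by
  unfold solution
  set l := s.toList with hl
  have hc : ((l.length : Int) - 1) = ((l.length - 1 : Nat) : Int) := by omega
  rw [hc, PySem.List.pyRange_zero_natCast, List.foldl_map]
  rw [PySem.List.foldl_congr_mem _ _
    (fun answer k => if (k % 2 == 0) && (l[0]? == l[k]?) then answer + 1 else answer) 0 ?_]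
  · rw [PySem.List.foldl_if_add_one]; simp
  · intro acc k hk
    rw [List.mem_range] at hk
    have hkn : k + 1 ≤ l.length := by omega
    have htb : PySem.List.slice l none (some ((k:Int) + 1)) = l.take (k+1) := by
      have e : ((k:Int) + 1) = ((k+1 : Nat) : Int) := by omega
      rw [e, PySem.List.slice_to_natCast]
    simp only [htb]
    have hlen : (l.take (k+1)).length = k + 1 := by simp; omega
    rw [hlen]
    by_cases hpar : (k+1) % 2 ≠ 0
    · by_cases h1 : k + 1 = 1
      · have hk0 : k = 0 := by omega
        subst hk0
        simp [hpar]
      · have e0 : ((0:Int)) = ((0:Nat):Int) := by norm_num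
        have ek : (((k+1:Nat)):Int) - 1 = ((k:Nat):Int) := by omega
        have hget0 : PySem.List.pyGet? (l.take (k+1)) 0 = l[0]? := by
          rw [e0, PySem.List.pyGet?_natCast]
          simp
        have hgetk : PySem.List.pyGet? (l.take (k+1)) ((((k+1:Nat)):Int) - 1) = l[k]? := by
          rw [ek, PySem.List.pyGet?_natCast]
          simp
        have h0 : l[0]? = some l[0] := List.getElem?_eq_getElem (by omega)
        have hkk : l[k]? = some l[k] := List.getElem?_eq_getElem (by omega)
        have hk2 : (k % 2 == 0) = true := by simp; omega
        rw [if_pos hpar, if_neg h1, hget0, hgetk, h0, hkk]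
        simp only [hk2, Bool.true_and]
        by_cases hcc : l[0] == l[k]
        · simp [hcc]
        · simp [hcc]
    · rw [Decidable.not_not] at hpar
      have hne : ¬ (k % 2 == 0) = true := by simp; omega
      simp [hpar, hne]

-- B's strided slice, evaluated
theorem slice_step_two (l : List Char) (h : 0 < l.length) :
    PySem.List.slice? l (some 0) (some ((l.length : Int) - 1)) 2
      = some ((List.range (l.length / 2)).filterMap (fun k => l[2*k]?)) := by
  have hne : l ≠ [] := List.length_pos_iff.mp h
  simp only [PySem.List.slice?, PySem.List.sliceIndices]
  norm_num [hne]
  have harg : (if 1 < l.length then (((l.length:Int) - 1 + 2 - 1) / 2).toNat else 0)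
      = l.length / 2 := by split_ifs <;> omega
  rw [harg]
  apply List.filterMap_congr
  intro x _
  congr 1

-- ===== VERDICT (by name: the statement is the Claim_ definition above) =====
theorem solution_spec : Claim_equal_solution := by
  intro s _
  unfold Spec_solution solution_alt
  by_cases h : s.toList.length = 0
  · -- empty string: A's range is empty, B returns 0 in its guard
    have hnil : s.toList = [] := List.length_eq_zero_iff.mp h
    unfold solution
    simp [hnil, PySem.List.pyRange]
  · have hpos : 0 < s.toList.length := by omega
    set l := s.toList with hl
    have hnil : l ≠ [] := List.length_pos_iff.mp hpos
    have hemp : l.isEmpty = false := by simp [hnil]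
    have hget : PySem.List.pyGet? l 0 = some (l.getD 0 'a') := by
      have e0 : ((0:Int)) = ((0:Nat):Int) := by norm_num
      have hgd : l.getD 0 'a' = l[0] := List.getD_eq_getElem l 'a' (by omega)
      rw [e0, PySem.List.pyGet?_natCast, List.getElem?_eq_getElem (by omega), hgd]
    simp only [hemp, Bool.false_eq_true, ite_false, hget, slice_step_two l hpos]
    -- reduce B's filterMap to a map over in-range indices
    have hmap : (List.range (l.length / 2)).filterMap (fun k => l[2*k]?)
        = (List.range (l.length / 2)).map (fun k => l.getD (2*k) 'a') := by
      rw [← List.filterMap_eq_map]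
      apply List.filterMap_congr
      intro k hk
      rw [List.mem_range] at hk
      have h2k : 2*k < l.length := by omega
      simp [List.getElem?_eq_getElem h2k, Function.comp]
    rw [hmap, solution_eq_countP s hpos, ← hl]
    rw [PySem.List.count_eq, List.count_eq_countP, List.countP_map]
    have hhalf : (l.length - 1 + 1) / 2 = l.length / 2 := by omega
    rw [countP_even_range, hhalf]
    congr 1
    apply List.countP_congr
    intro j hj
    rw [List.mem_range] at hj
    have h2j : 2*j < l.length := by omega
    simp [Function.comp, List.getElem?_eq_getElem h2j,
          List.getElem?_eq_getElem (show 0 < l.length by omega)]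
    constructor <;> (intro hx; simp_all)
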